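-- pv_equiv track=rewrite | github.com/abdyek/sduieee-en-iyi-algoritma-yarismasi-2018 | problem-3/main.py | zitIsaretIceriyor
-- ===== SOURCE A (Python) =====
-- def zitIsaretIceriyor(liste):
--     pozIceriyor = False
--     negIceriyor = False
--     for sayi in liste:
--         if abs(sayi) == sayi:
--             pozIceriyor = True
--         else:
--             negIceriyor = True
--     if negIceriyor and pozIceriyor:
--         return True
--     else:
--         return False
-- ===== SOURCE B (Python) =====
-- def zitIsaretIceriyor(liste):
--     if not liste:
--         return False
--     return min(liste) < 0 <= max(liste)
-- ===== Notes on version B (the rewrite author's own statement) =====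
-- stated objective: alternative
-- what changed: Instead of accumulating two boolean flags in a loop, B computes the numeric extremes min and max of the list and decides by the single order check min < 0 <= max, which holds exactly when both a negative and a non-negative element exist.
import Mathlib
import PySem

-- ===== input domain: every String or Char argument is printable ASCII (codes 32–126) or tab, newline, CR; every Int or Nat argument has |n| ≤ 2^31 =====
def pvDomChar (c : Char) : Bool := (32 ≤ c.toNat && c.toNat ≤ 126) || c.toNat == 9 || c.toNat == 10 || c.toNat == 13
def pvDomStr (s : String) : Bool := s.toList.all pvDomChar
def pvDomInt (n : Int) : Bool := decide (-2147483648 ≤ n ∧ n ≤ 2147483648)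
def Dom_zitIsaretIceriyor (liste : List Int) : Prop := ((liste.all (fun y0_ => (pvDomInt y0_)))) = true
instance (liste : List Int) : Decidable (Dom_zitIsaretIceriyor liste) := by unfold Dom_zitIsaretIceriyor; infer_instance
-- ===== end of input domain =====

-- B decides from the list's numeric extremes (min < 0 <= max) instead of A's flag-accumulating loop; objective: alternative.


-- ===== PORT A =====
-- literal port of A: one loop threading the (pozIceriyor, negIceriyor) flag pair
def zitIsaretIceriyor (liste : List Int) : Bool :=
  let flags := liste.foldl
    (fun (st : Bool × Bool) sayi =>
      if |sayi| = sayi then (true, st.2) else (st.1, true))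
    (false, false)
  if flags.2 && flags.1 then true else false

-- ===== PORT B =====
-- port of Source B: empty list → False, else the chained comparison min(liste) < 0 <= max(liste)
def zitIsaretIceriyor_alt (liste : List Int) : Bool :=
  match liste with
  | [] => false
  | h :: t => decide (t.foldl min h < 0 ∧ 0 ≤ t.foldl max h)

-- ===== PRECONDITION & SPEC =====
def Spec_zitIsaretIceriyor (liste : List Int) (out : Bool) : Prop := out = zitIsaretIceriyor_alt liste
instance (liste : List Int) (out : Bool) : Decidable (Spec_zitIsaretIceriyor liste out) := by unfold Spec_zitIsaretIceriyor; infer_instance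

-- ===== CLAIM (what is proved, stated in full; the proofs are below) =====
def Claim_equal_zitIsaretIceriyor : Prop := ∀ (liste : List Int), Dom_zitIsaretIceriyor liste → Spec_zitIsaretIceriyor liste (zitIsaretIceriyor liste)

-- ===== LEMMAS AND PROOFS =====
-- loop invariant for A: the flag pair after the fold is (p ∨ any x ≥ 0, n ∨ any x < 0)
theorem zit_fold_char (liste : List Int) (p n : Bool) :
    liste.foldl
      (fun (st : Bool × Bool) sayi =>
        if |sayi| = sayi then (true, st.2) else (st.1, true))
      (p, n)
    = (p || liste.any (fun x => decide (0 ≤ x)), n || liste.any (fun x => decide (x < 0))) := by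
  induction liste generalizing p n with
  | nil => simp
  | cons h t ih =>
    rw [List.foldl_cons]
    by_cases h0 : 0 ≤ h
    · have : (if |h| = h then (true, n) else (p, true)) = (true, n) := by
        simp [abs_eq_self.mpr h0]
      rw [this, ih]
      simp [List.any_cons, h0, not_lt.mpr h0]
    · have : (if |h| = h then (true, n) else (p, true)) = (p, true) := by
        simp [abs_eq_self, h0]
      rw [this, ih]
      simp [List.any_cons, h0, lt_of_not_ge h0]

-- the running min is negative iff some element scanned so far is negative
theorem foldl_min_neg (t : List Int) (h : Int) :
    (t.foldl min h < 0) ↔ (h < 0 ∨ t.any (fun x => decide (x < 0)) = true) := by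
  induction t generalizing h with
  | nil => simp
  | cons a t ih =>
    rw [List.foldl_cons, ih]
    simp
    tauto

-- the running max is non-negative iff some element scanned so far is non-negative
theorem foldl_max_nonneg (t : List Int) (h : Int) :
    (0 ≤ t.foldl max h) ↔ (0 ≤ h ∨ t.any (fun x => decide (0 ≤ x)) = true) := by
  induction t generalizing h with
  | nil => simp
  | cons a t ih =>
    rw [List.foldl_cons, ih]
    simp
    tauto

-- ===== VERDICT (by name: the statement is the Claim_ definition above) =====
theorem zitIsaretIceriyor_spec : Claim_equal_zitIsaretIceriyor := by
  intro liste _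
  unfold Spec_zitIsaretIceriyor zitIsaretIceriyor zitIsaretIceriyor_alt
  rw [zit_fold_char]
  cases liste with
  | nil => simp
  | cons h t =>
    simp only [Bool.false_or]
    have hm : (List.foldl min h t < 0) ↔ ((h :: t).any (fun x => decide (x < 0)) = true) := by
      rw [foldl_min_neg]; simp [List.any_cons]
    have hM : (0 ≤ List.foldl max h t) ↔ ((h :: t).any (fun x => decide (0 ≤ x)) = true) := by
      rw [foldl_max_nonneg]; simp [List.any_cons]
    split <;> rename_i hc <;> simp_all
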